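-- pv_equiv track=rewrite | github.com/kuldeep-creates/Leetcode | 2609-distinct-prime-factors-of-product-of-array/2609-distinct-prime-factors-of-product-of-array.py | distinctPrimeFactors
-- ===== SOURCE A (Python) =====
-- from typing import List
--
-- def distinctPrimeFactors(nums: List[int]) -> int:
--     s=set()
--     for i in nums:
--         for j in range(2,i+1):
--             while(i%j==0):
--                 s.add(j)
--                 i//=j
--
--     return len(s)
-- ===== SOURCE B (Python) =====
-- from typing import List
--
-- def distinctPrimeFactors(nums: List[int]) -> int:
--     primes = set()
--     for x in nums:
--         j = 2
--         while j * j <= x: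
--             if x % j == 0:
--                 primes.add(j)
--                 while x % j == 0:
--                     x //= j
--             j += 1
--         if x > 1:
--             primes.add(x)
--     return len(primes)
-- ===== Notes on version B (the rewrite author's own statement) =====
-- stated objective: faster
-- what changed: Trial division only up to sqrt(x) per element (adding the remaining prime cofactor at the end) instead of scanning every candidate divisor from 2 up to x.
import Mathlib
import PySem

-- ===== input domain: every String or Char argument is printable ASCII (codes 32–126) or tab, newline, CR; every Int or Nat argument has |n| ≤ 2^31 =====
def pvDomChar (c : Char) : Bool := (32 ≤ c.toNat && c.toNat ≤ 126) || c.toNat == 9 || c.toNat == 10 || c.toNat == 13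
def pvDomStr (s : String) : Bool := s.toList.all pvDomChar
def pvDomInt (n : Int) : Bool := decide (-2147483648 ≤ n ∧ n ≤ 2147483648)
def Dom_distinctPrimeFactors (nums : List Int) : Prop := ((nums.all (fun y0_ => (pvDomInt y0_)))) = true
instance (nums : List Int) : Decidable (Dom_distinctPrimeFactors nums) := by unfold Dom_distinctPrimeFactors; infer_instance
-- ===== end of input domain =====

-- B replaces A's scan of every candidate divisor from 2 up to the element by trial division only up to sqrt of the
-- element (adding the remaining prime cofactor at the end): same return value, fewer candidates per element.

-- ===== PORT A =====
-- division fact cited by the termination proofs of the loops below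
theorem pvDivLt (x j : Int) (hj : 2 ≤ j) (hx : 1 ≤ x) :
    0 ≤ PySem.Int.floordiv x j ∧ PySem.Int.floordiv x j < x := by
  rw [PySem.Int.floordiv_eq_ediv_of_pos (by omega)]
  refine ⟨Int.ediv_nonneg (by omega) (by omega), ?_⟩
  rw [Int.ediv_lt_iff_lt_mul (by omega)]; nlinarith

-- A's inner 'while i % j == 0: s.add(j); i //= j'
-- (the dec-guard '2 ≤ j ∧ 1 ≤ i' only makes the loop total; it holds on every state A reaches)
def pvWhileA (j i : Int) (s : PySem.Set Int) : Int × PySem.Set Int :=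
  if h : 2 ≤ j ∧ 1 ≤ i ∧ PySem.Int.mod i j = 0 then
    pvWhileA j (PySem.Int.floordiv i j) (PySem.Set.add s j)
  else (i, s)
termination_by i.toNat
decreasing_by
  have := pvDivLt i j h.1 h.2.1
  omega

def distinctPrimeFactors (nums : List Int) : Int :=
  let s := nums.foldl
    (fun s i =>
      ((PySem.List.pyRange 2 (i + 1) 1).foldl (fun st j => pvWhileA j st.1 st.2) (i, s)).2)
    PySem.Set.empty
  PySem.Set.len s

-- ===== PORT B =====
-- B's inner 'while x % j == 0: x //= j' (same totalising dec-guard convention as above)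
def pvStripB (j x : Int) : Int :=
  if h : 2 ≤ j ∧ 1 ≤ x ∧ PySem.Int.mod x j = 0 then
    pvStripB j (PySem.Int.floordiv x j)
  else x
termination_by x.toNat
decreasing_by
  have := pvDivLt x j h.1 h.2.1
  omega

-- cited by pvLoopB's termination proof
theorem pvStripB_le (j x : Int) : pvStripB j x ≤ x := by
  generalize hn : x.toNat = n
  induction n using Nat.strong_induction_on generalizing x with
  | _ n ih =>
    by_cases h : 2 ≤ j ∧ 1 ≤ x ∧ PySem.Int.mod x j = 0
    · rw [pvStripB, dif_pos h]
      have hd := pvDivLt x j h.1 h.2.1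
      have := ih (PySem.Int.floordiv x j).toNat (by omega) _ rfl
      omega
    · rw [pvStripB, dif_neg h]

-- B's outer 'while j * j <= x' loop
def pvLoopB (j x : Int) (s : PySem.Set Int) : Int × PySem.Set Int :=
  if h : 2 ≤ j ∧ j * j ≤ x then
    if PySem.Int.mod x j = 0 then
      pvLoopB (j + 1) (pvStripB j x) (PySem.Set.add s j)
    else
      pvLoopB (j + 1) x s
  else (x, s)
termination_by (x - j).toNat
decreasing_by
  · have h1 := pvStripB_le j x
    have h2 : j + 2 ≤ j * j := by nlinarith [h.1]
    omega
  · have h2 : j + 2 ≤ j * j := by nlinarith [h.1]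
    omega

def distinctPrimeFactors_alt (nums : List Int) : Int :=
  let s := nums.foldl
    (fun s x =>
      let r := pvLoopB 2 x s
      if 1 < r.1 then PySem.Set.add r.2 r.1 else r.2)
    PySem.Set.empty
  PySem.Set.len s

-- ===== PRECONDITION & SPEC =====
def Spec_distinctPrimeFactors (nums : List Int) (out : Int) : Prop := out = distinctPrimeFactors_alt nums
instance (nums : List Int) (out : Int) : Decidable (Spec_distinctPrimeFactors nums out) := by unfold Spec_distinctPrimeFactors; infer_instance

-- ===== CLAIM (what is proved, stated in full; the proofs are below) =====
def Claim_equal_distinctPrimeFactors : Prop := ∀ (nums : List Int), Dom_distinctPrimeFactors nums → Spec_distinctPrimeFactors nums (distinctPrimeFactors nums)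

-- ===== LEMMAS AND PROOFS =====

theorem pvAddIdem (s : PySem.Set Int) (j : Int) :
    PySem.Set.add (PySem.Set.add s j) j = PySem.Set.add s j := by
  simp only [PySem.Set.add, PySem.Set.contains]
  split_ifs with h h2 <;> simp_all

theorem pvDivFacts (x j : Int) (hj : 2 ≤ j) (hx : 1 ≤ x) (hm : PySem.Int.mod x j = 0) :
    1 ≤ PySem.Int.floordiv x j ∧ PySem.Int.floordiv x j < x ∧ j * PySem.Int.floordiv x j = x := by
  obtain ⟨c, hc⟩ := (PySem.Int.mod_eq_zero_iff_dvd x j).mp hm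
  subst hc
  rw [PySem.Int.floordiv_eq_ediv_of_pos (by omega), Int.mul_ediv_cancel_left _ (by omega : j ≠ 0)]
  have hc1 : 1 ≤ c := by nlinarith
  exact ⟨hc1, by nlinarith, rfl⟩

theorem pvStripB_of_ne (j x : Int) (hm : PySem.Int.mod x j ≠ 0) : pvStripB j x = x := by
  rw [pvStripB, dif_neg]
  rintro ⟨_, _, h⟩; exact hm h

theorem pvStripB_factsAux (j : Int) (hj : 2 ≤ j) : ∀ (n : ℕ) (x : Int), x.toNat ≤ n → 1 ≤ x →
    1 ≤ pvStripB j x ∧ pvStripB j x ∣ x ∧ PySem.Int.mod (pvStripB j x) j ≠ 0 := by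
  intro n
  induction n using Nat.strong_induction_on with
  | _ n ih =>
    intro x hn hx
    by_cases hm : PySem.Int.mod x j = 0
    · have hd := pvDivFacts x j hj hx hm
      have heq : pvStripB j x = pvStripB j (PySem.Int.floordiv x j) := by
        conv_lhs => rw [pvStripB]
        rw [dif_pos ⟨hj, hx, hm⟩]
      have hrec := ih (PySem.Int.floordiv x j).toNat (by omega) _ le_rfl hd.1
      refine ⟨heq ▸ hrec.1, ?_, heq ▸ hrec.2.2⟩
      rw [heq]
      exact dvd_trans hrec.2.1 ⟨j, by rw [mul_comm]; exact hd.2.2.symm⟩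
    · rw [pvStripB_of_ne j x hm]
      exact ⟨hx, dvd_rfl, hm⟩

theorem pvStripB_facts (j x : Int) (hj : 2 ≤ j) (hx : 1 ≤ x) :
    1 ≤ pvStripB j x ∧ pvStripB j x ∣ x ∧ PySem.Int.mod (pvStripB j x) j ≠ 0 :=
  pvStripB_factsAux j hj x.toNat x le_rfl hx

theorem pvStripB_lt (j x : Int) (hj : 2 ≤ j) (hx : 1 ≤ x) (hm : PySem.Int.mod x j = 0) :
    pvStripB j x < x := by
  conv_lhs => rw [pvStripB]
  rw [dif_pos ⟨hj, hx, hm⟩]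
  have hd := pvDivLt x j hj hx
  have := pvStripB_le j (PySem.Int.floordiv x j)
  omega

-- the reference list: the distinct prime factors of cur (all ≥ j, cur having none below j), in increasing
-- order — exactly the values A's row and B's row add to the set, in the order they add them
def pvSpf (j cur : Int) : List Int :=
  if h : 2 ≤ j ∧ 2 ≤ cur ∧ j ≤ cur then
    if hm : PySem.Int.mod cur j = 0 then j :: pvSpf (j + 1) (pvStripB j cur)
    else pvSpf (j + 1) cur
  else []
termination_by (2 * cur - j).toNat
decreasing_by
  · have h1 := pvStripB_lt j cur h.1 (by omega) hm
    omega
  · omega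

theorem pvSpf_ne (j cur : Int) (hj : 2 ≤ j) (hm : PySem.Int.mod cur j ≠ 0) :
    pvSpf j cur = pvSpf (j + 1) cur := by
  by_cases h : 2 ≤ j ∧ 2 ≤ cur ∧ j ≤ cur
  · rw [pvSpf, dif_pos h, dif_neg hm]
  · rw [pvSpf, dif_neg h, pvSpf, dif_neg]
    rintro ⟨_, h2, h3⟩
    exact h ⟨hj, h2, by omega⟩

theorem pvSpf_step (j cur : Int) (hj : 2 ≤ j) (hcur : 1 ≤ cur) (hm : PySem.Int.mod cur j = 0) :
    pvSpf j cur = j :: pvSpf (j + 1) (pvStripB j cur) := by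
  have hjc : j ≤ cur := by
    by_contra hlt
    push_neg at hlt
    rw [PySem.Int.mod_eq_emod_of_pos (by omega), Int.emod_eq_of_lt (by omega) (by omega)] at hm
    omega
  rw [pvSpf, dif_pos ⟨hj, by omega, hjc⟩, dif_pos hm]

theorem pvSpf_nil (j cur : Int) (h : cur < 2 ∨ cur < j) : pvSpf j cur = [] := by
  rw [pvSpf, dif_neg]
  rintro ⟨h1, h2, h3⟩
  omega

theorem pvWhileA_eqAux (j : Int) (hj : 2 ≤ j) : ∀ (n : ℕ) (x : Int) (s : PySem.Set Int), x.toNat ≤ n → 1 ≤ x →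
    pvWhileA j x s = (pvStripB j x, if PySem.Int.mod x j = 0 then PySem.Set.add s j else s) := by
  intro n
  induction n using Nat.strong_induction_on with
  | _ n ih =>
    intro x s hn hx
    by_cases hm : PySem.Int.mod x j = 0
    · rw [pvWhileA, dif_pos ⟨hj, hx, hm⟩]
      have hd := pvDivFacts x j hj hx hm
      rw [ih (PySem.Int.floordiv x j).toNat (by omega) _ _ le_rfl hd.1]
      have hstrip : pvStripB j x = pvStripB j (PySem.Int.floordiv x j) := by
        conv_lhs => rw [pvStripB]
        rw [dif_pos ⟨hj, hx, hm⟩]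
      rw [if_pos hm, hstrip]
      have hcollapse :
          (if PySem.Int.mod (PySem.Int.floordiv x j) j = 0 then
            PySem.Set.add (PySem.Set.add s j) j else PySem.Set.add s j) = PySem.Set.add s j := by
        split_ifs with h2
        · exact pvAddIdem s j
        · rfl
      rw [hcollapse]
    · rw [pvWhileA, dif_neg (by rintro ⟨_, _, h⟩; exact hm h), pvStripB_of_ne j x hm, if_neg hm]

theorem pvWhileA_eq (j x : Int) (s : PySem.Set Int) (hj : 2 ≤ j) (hx : 1 ≤ x) :
    pvWhileA j x s = (pvStripB j x, if PySem.Int.mod x j = 0 then PySem.Set.add s j else s) :=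
  pvWhileA_eqAux j hj x.toNat x s le_rfl hx

-- A's row over 'range(j, m+1)': the set gains exactly pvSpf j x, in order
theorem pvA_loop (m : Int) : ∀ (n : ℕ) (j x : Int) (s : PySem.Set Int),
    (m + 1 - j).toNat ≤ n → 2 ≤ j → 1 ≤ x → x ≤ m →
    (∀ k : Int, 2 ≤ k → k < j → PySem.Int.mod x k ≠ 0) →
    ((PySem.List.pyRange j (m + 1) 1).foldl (fun st j' => pvWhileA j' st.1 st.2) (x, s)).2
      = (pvSpf j x).foldl PySem.Set.add s := by
  intro n
  induction n using Nat.strong_induction_on with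
  | _ n ih =>
    intro j x s hn hj hx hxm hinv
    by_cases hjm : m < j
    · rw [PySem.List.pyRange_one_eq_nil (by omega), List.foldl_nil,
        pvSpf_nil j x (Or.inr (by omega)), List.foldl_nil]
    · push_neg at hjm
      rw [PySem.List.pyRange_one_cons (by omega), List.foldl_cons]
      show ((PySem.List.pyRange (j + 1) (m + 1) 1).foldl _ (pvWhileA j x s)).2 = _
      rw [pvWhileA_eq j x s hj hx]
      by_cases hm : PySem.Int.mod x j = 0
      · rw [if_pos hm]
        have hfacts := pvStripB_facts j x hj (by omega)
        rw [pvSpf_step j x hj hx hm, List.foldl_cons]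
        refine ih (m + 1 - (j + 1)).toNat (by omega) (j + 1) (pvStripB j x) (PySem.Set.add s j)
          le_rfl (by omega) hfacts.1 (le_trans (pvStripB_le j x) hxm) ?_
        intro k hk2 hkj
        rcases eq_or_lt_of_le (by omega : k ≤ j) with hkeq | hklt
        · subst hkeq; exact hfacts.2.2
        · intro hk0
          exact hinv k hk2 hklt ((PySem.Int.mod_eq_zero_iff_dvd x k).mpr
            (dvd_trans ((PySem.Int.mod_eq_zero_iff_dvd _ k).mp hk0) hfacts.2.1))
      · rw [if_neg hm, pvStripB_of_ne j x hm, pvSpf_ne j x hj hm]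
        refine ih (m + 1 - (j + 1)).toNat (by omega) (j + 1) x s le_rfl (by omega) hx hxm ?_
        intro k hk2 hkj
        rcases eq_or_lt_of_le (by omega : k ≤ j) with hkeq | hklt
        · subst hkeq; exact hm
        · exact hinv k hk2 hklt

theorem pvA_elem (i : Int) (s : PySem.Set Int) :
    ((PySem.List.pyRange 2 (i + 1) 1).foldl (fun st j => pvWhileA j st.1 st.2) (i, s)).2
      = (pvSpf 2 i).foldl PySem.Set.add s := by
  by_cases h2 : 2 ≤ i
  · exact pvA_loop i (i + 1 - 2).toNat 2 i s le_rfl le_rfl (by omega) le_rfl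
      (fun k hk2 hklt => by omega)
  · rw [PySem.List.pyRange_one_eq_nil (by omega), List.foldl_nil,
      pvSpf_nil 2 i (Or.inl (by omega)), List.foldl_nil]

-- when cur has no divisor in [2, j) nor in [j, cur), cur itself is its only remaining prime factor
theorem pvSpf_prime : ∀ (n : ℕ) (j x : Int), (x - j).toNat ≤ n → 2 ≤ j → 2 ≤ x → j ≤ x →
    (∀ k : Int, j ≤ k → k < x → PySem.Int.mod x k ≠ 0) → pvSpf j x = [x] := by
  intro n
  induction n using Nat.strong_induction_on with
  | _ n ih =>
    intro j x hn hj hx hjx hinv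
    rcases eq_or_lt_of_le hjx with heq | hlt
    · subst heq
      rw [pvSpf, dif_pos ⟨hj, hx, le_rfl⟩,
        dif_pos ((PySem.Int.mod_eq_zero_iff_dvd j j).mpr dvd_rfl)]
      have hs : pvStripB j j = 1 := by
        conv_lhs => rw [pvStripB]
        rw [dif_pos ⟨hj, by omega, (PySem.Int.mod_eq_zero_iff_dvd j j).mpr dvd_rfl⟩,
          PySem.Int.floordiv_eq_ediv_of_pos (by omega), Int.ediv_self (by omega)]
        rw [pvStripB, dif_neg]
        rintro ⟨_, _, hmm⟩
        rw [PySem.Int.mod_eq_emod_of_pos (by omega), Int.emod_eq_of_lt (by omega) (by omega)] at hmm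
        omega
      rw [hs, pvSpf_nil (j + 1) 1 (Or.inl (by omega))]
    · have hmj : PySem.Int.mod x j ≠ 0 := hinv j le_rfl hlt
      rw [pvSpf_ne j x hj hmj]
      exact ih (x - (j + 1)).toNat (by omega) (j + 1) x le_rfl (by omega) hx (by omega)
        (fun k hk hkx => hinv k (by omega) hkx)

-- B's row: the set gains exactly pvSpf j x, in order
theorem pvB_loop : ∀ (n : ℕ) (j x : Int) (s : PySem.Set Int), (x - j).toNat ≤ n → 2 ≤ j → 1 ≤ x →
    (∀ k : Int, 2 ≤ k → k < j → PySem.Int.mod x k ≠ 0) →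
    (if 1 < (pvLoopB j x s).1 then PySem.Set.add (pvLoopB j x s).2 (pvLoopB j x s).1 else (pvLoopB j x s).2)
      = (pvSpf j x).foldl PySem.Set.add s := by
  intro n
  induction n using Nat.strong_induction_on with
  | _ n ih =>
    intro j x s hn hj hx hinv
    by_cases hg : j * j ≤ x
    · have hjj : j + j ≤ j * j := by nlinarith
      by_cases hm : PySem.Int.mod x j = 0
      · rw [pvLoopB, dif_pos ⟨hj, hg⟩, if_pos hm]
        have hfacts := pvStripB_facts j x hj (by omega)
        have hlt := pvStripB_lt j x hj (by omega) hm
        rw [pvSpf_step j x hj hx hm, List.foldl_cons]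
        refine ih (pvStripB j x - (j + 1)).toNat (by omega) (j + 1) (pvStripB j x)
          (PySem.Set.add s j) le_rfl (by omega) hfacts.1 ?_
        intro k hk2 hkj
        rcases eq_or_lt_of_le (by omega : k ≤ j) with hkeq | hklt
        · subst hkeq; exact hfacts.2.2
        · intro hk0
          exact hinv k hk2 hklt ((PySem.Int.mod_eq_zero_iff_dvd x k).mpr
            (dvd_trans ((PySem.Int.mod_eq_zero_iff_dvd _ k).mp hk0) hfacts.2.1))
      · rw [pvLoopB, dif_pos ⟨hj, hg⟩, if_neg hm, pvSpf_ne j x hj hm]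
        refine ih (x - (j + 1)).toNat (by omega) (j + 1) x s le_rfl (by omega) hx ?_
        intro k hk2 hkj
        rcases eq_or_lt_of_le (by omega : k ≤ j) with hkeq | hklt
        · subst hkeq; exact hm
        · exact hinv k hk2 hklt
    · rw [pvLoopB, dif_neg (by rintro ⟨_, hgg⟩; exact hg hgg)]
      dsimp only
      by_cases hx1 : 1 < x
      · by_cases hjx : j ≤ x
        · rw [if_pos hx1,
            pvSpf_prime (x - j).toNat j x le_rfl hj (by omega) hjx ?_, List.foldl_cons, List.foldl_nil]
          intro k hk hkx
          intro hk0
          obtain ⟨c, hc⟩ := (PySem.Int.mod_eq_zero_iff_dvd x k).mp hk0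
          have hc1 : 1 ≤ c := by nlinarith
          have hcne : c ≠ 1 := by rintro rfl; omega
          have hcx : c ∣ x := ⟨k, by rw [hc]; ring⟩
          have hcj : j ≤ c := by
            by_contra hcj
            push_neg at hcj
            exact hinv c (by omega) hcj ((PySem.Int.mod_eq_zero_iff_dvd x c).mpr hcx)
          nlinarith
        · exact absurd ((PySem.Int.mod_eq_zero_iff_dvd x x).mpr dvd_rfl)
            (hinv x (by omega) (by omega))
      · rw [if_neg (by omega), pvSpf_nil j x (Or.inl (by omega)), List.foldl_nil]

theorem pvB_elem (x : Int) (s : PySem.Set Int) :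
    (let r := pvLoopB 2 x s; if 1 < r.1 then PySem.Set.add r.2 r.1 else r.2)
      = (pvSpf 2 x).foldl PySem.Set.add s := by
  show (if 1 < (pvLoopB 2 x s).1 then PySem.Set.add (pvLoopB 2 x s).2 (pvLoopB 2 x s).1 else (pvLoopB 2 x s).2) = _
  by_cases hx : 1 ≤ x
  · exact pvB_loop (x - 2).toNat 2 x s le_rfl le_rfl hx (fun k hk2 hklt => by omega)
  · rw [pvLoopB, dif_neg (by rintro ⟨_, hg⟩; omega)]
    dsimp only
    rw [if_neg (by omega), pvSpf_nil 2 x (Or.inl (by omega)), List.foldl_nil]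

-- ===== VERDICT (by name: the statement is the Claim_ definition above) =====
theorem distinctPrimeFactors_spec : Claim_equal_distinctPrimeFactors := by
  intro nums _
  show distinctPrimeFactors nums = distinctPrimeFactors_alt nums
  have hA : distinctPrimeFactors nums
      = PySem.Set.len (nums.foldl (fun s i => (pvSpf 2 i).foldl PySem.Set.add s) PySem.Set.empty) := by
    show PySem.Set.len (nums.foldl
        (fun s i => ((PySem.List.pyRange 2 (i + 1) 1).foldl (fun st j => pvWhileA j st.1 st.2) (i, s)).2)
        PySem.Set.empty) = _
    rw [PySem.List.foldl_congr_mem nums _ (fun s i => (pvSpf 2 i).foldl PySem.Set.add s)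
      PySem.Set.empty (fun acc x _ => pvA_elem x acc)]
  have hB : distinctPrimeFactors_alt nums
      = PySem.Set.len (nums.foldl (fun s i => (pvSpf 2 i).foldl PySem.Set.add s) PySem.Set.empty) := by
    show PySem.Set.len (nums.foldl
        (fun s x => let r := pvLoopB 2 x s; if 1 < r.1 then PySem.Set.add r.2 r.1 else r.2)
        PySem.Set.empty) = _
    rw [PySem.List.foldl_congr_mem nums _ (fun s x => (pvSpf 2 x).foldl PySem.Set.add s)
      PySem.Set.empty (fun acc x _ => pvB_elem x acc)]
  rw [hA, hB]
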